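-- pv_equiv track=rewrite | github.com/imbaHerby/Exercise | exercise.py | aboveBelow
-- ===== SOURCE A (Python) =====
-- def aboveBelow(nums: list, target: int) -> dict:
--     countS = countL = 0
--
--     for n in nums:
--         if n > target:
--             countL += 1
--         elif n < target:
--             countS += 1
--
--     return {
--         'above': countL,
--         'below': countS,
--     }
-- ===== SOURCE B (Python) =====
-- import bisect
--
-- def aboveBelow(nums: list, target: int) -> dict:
--     s = sorted(nums)
--     below = bisect.bisect_left(s, target)
--     above = len(s) - bisect.bisect_right(s, target)
--     return {
--         'above': above,
--         'below': below,
--     }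
-- ===== Notes on version B (the rewrite author's own statement) =====
-- stated objective: alternative
-- what changed: B sorts a copy of the list and reads both counts off with bisect_left/bisect_right instead of A's single counting scan with two accumulators.
import Mathlib
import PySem

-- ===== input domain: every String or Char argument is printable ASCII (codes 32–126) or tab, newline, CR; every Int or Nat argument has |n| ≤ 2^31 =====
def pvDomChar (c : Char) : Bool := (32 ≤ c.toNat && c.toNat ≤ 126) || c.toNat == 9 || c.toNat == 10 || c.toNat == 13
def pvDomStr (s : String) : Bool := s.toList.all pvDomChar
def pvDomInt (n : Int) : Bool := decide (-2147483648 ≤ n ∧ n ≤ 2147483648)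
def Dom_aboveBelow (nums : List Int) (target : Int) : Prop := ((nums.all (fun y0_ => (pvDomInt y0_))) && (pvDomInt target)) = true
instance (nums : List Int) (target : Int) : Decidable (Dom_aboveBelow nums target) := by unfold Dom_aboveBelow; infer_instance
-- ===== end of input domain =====

-- B replaces A's single counting scan by sort-a-copy + bisect_left/bisect_right range counting (alternative algorithm, not faster).


-- ===== PORT A =====
-- countS/countL accumulated over the list in order; dict literal is the association list in insertion order.
def aboveBelow (nums : List Int) (target : Int) : List (String × Int) :=
  let st := nums.foldl (fun (c : Int × Int) n =>
    if n > target then (c.1, c.2 + 1)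
    else if n < target then (c.1 + 1, c.2)
    else c) (0, 0)
  [("above", st.2), ("below", st.1)]

-- ===== PORT B =====
def aboveBelow_alt (nums : List Int) (target : Int) : List (String × Int) :=
  let s := PySem.List.sorted nums (fun x => x) false
  let below : Int := (PySem.List.bisectLeft s target : Int)
  let above : Int := (s.length : Int) - (PySem.List.bisectRight s target : Int)
  [("above", above), ("below", below)]

-- ===== PRECONDITION & SPEC =====
def Spec_aboveBelow (nums : List Int) (target : Int) (out : List (String × Int)) : Prop := out = aboveBelow_alt nums target
instance (nums : List Int) (target : Int) (out : List (String × Int)) : Decidable (Spec_aboveBelow nums target out) := by unfold Spec_aboveBelow; infer_instance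

-- ===== CLAIM (what is proved, stated in full; the proofs are below) =====
def Claim_equal_aboveBelow : Prop := ∀ (nums : List Int) (target : Int), Dom_aboveBelow nums target → Spec_aboveBelow nums target (aboveBelow nums target)

-- ===== LEMMAS AND PROOFS =====

/-- A's fold computes (countP (<t), countP (>t)). -/
lemma foldA_eq (nums : List Int) (target : Int) (a b : Int) :
    nums.foldl (fun (c : Int × Int) n =>
      if n > target then (c.1, c.2 + 1)
      else if n < target then (c.1 + 1, c.2)
      else c) (a, b)
    = (a + (nums.countP (fun n => n < target) : Int),
       b + (nums.countP (fun n => target < n) : Int)) := by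
  induction nums generalizing a b with
  | nil => simp
  | cons x t ih =>
    by_cases hgt : x > target
    · simp [hgt, not_lt.mpr (le_of_lt hgt), ih]
      ring
    · by_cases hlt : x < target
      · simp [hgt, hlt, ih]
        ring
      · simp [hgt, hlt, ih]

/-- A monotone index characterisation pins down countP: if exactly the first k positions satisfy p,
    then countP p = k. -/
lemma countP_eq_of_prefix {p : Int → Bool} :
    ∀ (s : List Int) (k : Nat), k ≤ s.length →
    (∀ (j : Nat) (hj : j < s.length), j < k → p s[j]) →
    (∀ (j : Nat) (hj : j < s.length), k ≤ j → ¬ p s[j]) →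
    s.countP p = k := by
  intro s
  induction s with
  | nil => intro k hk _ _; simpa using (Nat.le_zero.mp hk).symm
  | cons x t ih =>
    intro k hk h1 h2
    cases k with
    | zero =>
      have hx : ¬ p x := by simpa using h2 0 (by simp) (Nat.zero_le 0)
      have ht : t.countP p = 0 := by
        apply ih 0 (Nat.zero_le _) (by intro j hj hj0; omega)
        intro j hj _
        simpa using h2 (j+1) (by simpa using Nat.succ_lt_succ hj) (Nat.zero_le _)
      simp [hx, ht]
    | succ k' =>
      have hx : p x := by simpa using h1 0 (by simp) (Nat.succ_pos _)
      have ht : t.countP p = k' := by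
        apply ih k' (by simpa using Nat.succ_le_succ_iff.mp hk)
        · intro j hj hjk
          simpa using h1 (j+1) (by simpa using Nat.succ_lt_succ hj) (Nat.succ_lt_succ hjk)
        · intro j hj hjk
          simpa using h2 (j+1) (by simpa using Nat.succ_lt_succ hj) (Nat.succ_le_succ hjk)
      simp [hx, ht]

/-- bisect_left on the sorted copy counts the elements strictly below the target. -/
lemma bisectLeft_countP (nums : List Int) (target : Int) :
    PySem.List.bisectLeft (PySem.List.sorted nums (fun x => x) false) target
      = nums.countP (fun n => n < target) := by
  set s := PySem.List.sorted nums (fun x => x) false with hs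
  have hpw : s.Pairwise (fun a b => a ≤ b) := by
    simpa using PySem.List.sorted_pairwise nums (fun x => x)
  obtain ⟨hle, h1, h2⟩ := PySem.List.bisectLeft_spec s target hpw
  have hcs : s.countP (fun n => n < target) = PySem.List.bisectLeft s target := by
    apply countP_eq_of_prefix s _ hle
    · intro j hj hjk; simpa using h1 j hj hjk
    · intro j hj hjk; simpa using not_lt.mpr (h2 j hj hjk)
  have hperm : s.Perm nums := PySem.List.sorted_perm nums (fun x => x) false
  rw [← hperm.countP_eq, hcs]

/-- len - bisect_right on the sorted copy counts the elements strictly above the target. -/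
lemma bisectRight_countP (nums : List Int) (target : Int) :
    nums.length - PySem.List.bisectRight (PySem.List.sorted nums (fun x => x) false) target
      = nums.countP (fun n => target < n) := by
  set s := PySem.List.sorted nums (fun x => x) false with hs
  have hpw : s.Pairwise (fun a b => a ≤ b) := by
    simpa using PySem.List.sorted_pairwise nums (fun x => x)
  obtain ⟨hle, h1, h2⟩ := PySem.List.bisectRight_spec s target hpw
  have hcs : s.countP (fun n => n ≤ target) = PySem.List.bisectRight s target := by
    apply countP_eq_of_prefix s _ hle
    · intro j hj hjk; simpa using h1 j hj hjk
    · intro j hj hjk; simpa using not_le.mpr (h2 j hj hjk)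
  have hperm : s.Perm nums := PySem.List.sorted_perm nums (fun x => x) false
  have hlen : s.length = nums.length := hperm.length_eq
  have hadd : ∀ l : List Int, l.countP (fun n => target < n) + l.countP (fun n => n ≤ target) = l.length := by
    intro l
    induction l with
    | nil => simp
    | cons a t ih =>
      by_cases h : target < a
      · simp [h, not_le.mpr h]; omega
      · simp [h, not_lt.mp h]; omega
  have hsplit : s.countP (fun n => target < n) = s.length - s.countP (fun n => n ≤ target) := by
    have := hadd s
    omega
  rw [← hperm.countP_eq, hsplit, hcs, hlen]

-- ===== VERDICT (by name: the statement is the Claim_ definition above) =====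
theorem aboveBelow_spec : Claim_equal_aboveBelow := by
  intro nums target _
  unfold Spec_aboveBelow aboveBelow aboveBelow_alt
  simp only [foldA_eq, zero_add]
  have hlen : (PySem.List.sorted nums (fun x => x) false).length = nums.length :=
    (PySem.List.sorted_perm nums (fun x => x) false).length_eq
  have hbr := bisectRight_countP nums target
  have hbrle : PySem.List.bisectRight (PySem.List.sorted nums (fun x => x) false) target ≤ nums.length := by
    have hpw : (PySem.List.sorted nums (fun x => x) false).Pairwise (fun a b => a ≤ b) := by
      simpa using PySem.List.sorted_pairwise nums (fun x => x)
    have := (PySem.List.bisectRight_spec _ target hpw).1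
    omega
  rw [bisectLeft_countP, hlen]
  have h2 : ((nums.length : Int) - (PySem.List.bisectRight (PySem.List.sorted nums (fun x => x) false) target : Int))
      = (nums.countP (fun n => target < n) : Int) := by omega
  rw [h2]
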